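-- pv_equiv track=rewrite | github.com/AflalHussain/persona-driven-website-analyzer | site_analysis_all_in_one.py | _preprocess_content
-- ===== SOURCE A (Python) =====
-- def _preprocess_content(text_content: str, max_length: int = 2000) -> str:
--     """Clean and optimize text content to reduce tokens"""
--     # Remove extra whitespace
--     text = ' '.join(text_content.split())
--
--     # Remove duplicate paragraphs
--     seen_paragraphs = set()
--     unique_paragraphs = []
--     for paragraph in text.split('\n'):
--         if paragraph.strip() and paragraph not in seen_paragraphs:
--             seen_paragraphs.add(paragraph)
--             unique_paragraphs.append(paragraph)
--
--     # Join and truncate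
--     cleaned_text = '\n'.join(unique_paragraphs)
--     return cleaned_text[:max_length]
-- ===== SOURCE B (Python) =====
-- def _preprocess_content(text_content: str, max_length: int = 2000) -> str:
--     """Whitespace collapse leaves no newlines, so A's paragraph-dedup loop is a no-op."""
--     return ' '.join(text_content.split())[:max_length]
-- ===== Notes on version B (the rewrite author's own statement) =====
-- stated objective: simpler
-- what changed: B drops A's paragraph-splitting/set-dedup loop entirely (whitespace collapse leaves no newlines, so the loop is provably a no-op) and returns the normalized string truncated directly.
import Mathlib
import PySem

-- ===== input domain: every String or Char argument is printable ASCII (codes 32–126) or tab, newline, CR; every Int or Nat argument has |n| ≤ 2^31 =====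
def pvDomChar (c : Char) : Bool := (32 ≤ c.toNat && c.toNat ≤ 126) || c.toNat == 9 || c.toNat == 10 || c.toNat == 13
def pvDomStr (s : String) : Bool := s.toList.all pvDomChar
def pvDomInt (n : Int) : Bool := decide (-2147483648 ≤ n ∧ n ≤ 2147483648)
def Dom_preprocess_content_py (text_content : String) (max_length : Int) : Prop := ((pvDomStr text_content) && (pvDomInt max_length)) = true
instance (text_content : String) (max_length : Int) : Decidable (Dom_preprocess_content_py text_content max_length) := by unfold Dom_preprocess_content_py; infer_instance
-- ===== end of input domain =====

-- ===== PORT A =====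
-- B collapses A's normalize→split('\n')→set-dedup→join→truncate pipeline into normalize→truncate;
-- equivalence is proved because the normalized text contains no newline, so A's dedup loop is a no-op.
def preprocess_content_py (text_content : String) (max_length : Int) : String :=
  let text : String := PySem.Str.join " " (PySem.Str.split₀ text_content)
  let paragraphs : List String := (PySem.Chars.splitOn text.toList "\n".toList).map String.ofList
  let st : PySem.Set String × List String :=
    paragraphs.foldl (fun st p =>
      if PySem.Str.strip p ≠ "" ∧ p ∉ st.1 then (PySem.Set.add st.1 p, st.2 ++ [p]) else st)
      (PySem.Set.empty, [])
  let cleaned : String := PySem.Str.join "\n" st.2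
  PySem.Str.slice cleaned none (some max_length)

-- ===== PORT B =====
def preprocess_content_py_alt (text_content : String) (max_length : Int) : String :=
  PySem.Str.slice (PySem.Str.join " " (PySem.Str.split₀ text_content)) none (some max_length)

-- ===== PRECONDITION & SPEC =====
def Spec_preprocess_content_py (text_content : String) (max_length : Int) (out : String) : Prop := out = preprocess_content_py_alt text_content max_length
instance (text_content : String) (max_length : Int) (out : String) : Decidable (Spec_preprocess_content_py text_content max_length out) := by unfold Spec_preprocess_content_py; infer_instance

-- ===== CLAIM (what is proved, stated in full; the proofs are below) =====
def Claim_equal_preprocess_content_py : Prop := ∀ (text_content : String) (max_length : Int), Dom_preprocess_content_py text_content max_length → Spec_preprocess_content_py text_content max_length (preprocess_content_py text_content max_length)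

-- ===== LEMMAS AND PROOFS =====

theorem split0_go_words (s : List Char) :
    ∀ (cur : List Char) (acc : List (List Char)),
      (∀ c ∈ cur, PySem.Chars.isspace c = false) →
      (∀ w ∈ acc, w ≠ [] ∧ ∀ c ∈ w, PySem.Chars.isspace c = false) →
      ∀ w ∈ PySem.Chars.split₀.go s cur acc, w ≠ [] ∧ ∀ c ∈ w, PySem.Chars.isspace c = false := by
  induction s with
  | nil =>
    intro cur acc hcur hacc w hw
    unfold PySem.Chars.split₀.go at hw
    by_cases hc : cur.isEmpty = true
    · simp [hc] at hw; exact hacc w hw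
    · simp [hc] at hw
      rcases hw with h | h
      · exact hacc w h
      · subst h
        constructor
        · simpa [List.isEmpty_iff] using hc
        · intro c hc'; exact hcur c (by simpa using hc')
  | cons c rest ih =>
    intro cur acc hcur hacc w hw
    unfold PySem.Chars.split₀.go at hw
    by_cases hs : PySem.Chars.isspace c = true
    · by_cases hc : cur.isEmpty = true
      · simp [hs, hc] at hw
        exact ih [] acc (by simp) hacc w hw
      · simp [hs, hc] at hw
        refine ih [] (cur.reverse :: acc) (by simp) ?_ w hw
        intro v hv
        rcases List.mem_cons.mp hv with h | h
        · subst h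
          exact ⟨by simpa [List.isEmpty_iff] using hc, fun d hd => hcur d (by simpa using hd)⟩
        · exact hacc v h
    · simp [hs] at hw
      refine ih (c :: cur) acc ?_ hacc w hw
      intro d hd
      rcases List.mem_cons.mp hd with h | h
      · subst h; simpa using hs
      · exact hcur d h

theorem split0_words (s : List Char) :
    ∀ w ∈ PySem.Chars.split₀ s, w ≠ [] ∧ ∀ c ∈ w, PySem.Chars.isspace c = false :=
  split0_go_words s [] [] (by simp) (by simp)

theorem intercalate_cc {α : Type} (sep w v : List α) (vs : List (List α)) :
    sep.intercalate (w :: v :: vs) = w ++ sep ++ sep.intercalate (v :: vs) := by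
  simp [List.intercalate, List.intersperse]

theorem mem_intercalate_aux {α : Type} (sep : List α) (ls : List (List α)) (x : α)
    (h : x ∈ sep.intercalate ls) : (∃ w ∈ ls, x ∈ w) ∨ x ∈ sep := by
  induction ls with
  | nil => simp [List.intercalate] at h
  | cons w ws ih =>
    cases ws with
    | nil => simp [List.intercalate] at h; exact Or.inl ⟨w, by simp, h⟩
    | cons v vs =>
      rw [intercalate_cc] at h
      simp only [List.mem_append] at h
      rcases h with (h | h) | h
      · exact Or.inl ⟨w, by simp, h⟩
      · exact Or.inr h
      · rcases ih h with ⟨u, hu, hx⟩ | h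
        · exact Or.inl ⟨u, List.mem_cons_of_mem _ hu, hx⟩
        · exact Or.inr h

theorem no_newline (s : List Char)
    (hw : ∀ w ∈ PySem.Chars.split₀ s, w ≠ [] ∧ ∀ c ∈ w, PySem.Chars.isspace c = false) :
    '\n' ∉ PySem.Chars.join [' '] (PySem.Chars.split₀ s) := by
  intro hmem
  unfold PySem.Chars.join at hmem
  rcases mem_intercalate_aux _ _ _ hmem with ⟨w, hwmem, hcw⟩ | hsep
  · have := (hw w hwmem).2 '\n' hcw
    simp [PySem.Chars.isspace] at this
  · simp at hsep

theorem splitOn_go_no_sep (c : Char) :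
    ∀ (l : List Char) (fuel : Nat) (cur : List Char) (acc : List (List Char)),
      l.length < fuel → c ∉ l →
      PySem.Chars.splitOn.go [c] fuel l cur acc = ((cur.reverse ++ l) :: acc).reverse := by
  intro l
  induction l with
  | nil =>
    intro fuel cur acc hf _
    cases fuel with
    | zero => omega
    | succ n => unfold PySem.Chars.splitOn.go; simp
  | cons d rest ih =>
    intro fuel cur acc hf hn
    cases fuel with
    | zero => omega
    | succ n =>
      unfold PySem.Chars.splitOn.go
      have hcd : ([c].isPrefixOf (d :: rest)) = false := by
        simp [List.isPrefixOf, List.mem_cons, not_or] at hn ⊢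
        exact fun h => hn.1 h
      rw [if_neg (by simp [hcd])]
      rw [ih n (d :: cur) acc (by simpa using Nat.lt_of_succ_lt_succ hf) (by simp [List.mem_cons, not_or] at hn; exact hn.2)]
      simp

theorem splitOn_no_sep (c : Char) (l : List Char) (h : c ∉ l) :
    PySem.Chars.splitOn l [c] = [l] := by
  unfold PySem.Chars.splitOn
  rw [splitOn_go_no_sep c l (l.length + 1) [] [] (by omega) h]
  simp

theorem mem_dropWhile_of_not {l : List Char} {c : Char} (hc : c ∈ l)
    (hs : PySem.Chars.isspace c = false) : c ∈ l.dropWhile PySem.Chars.isspace := by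
  induction l with
  | nil => simp at hc
  | cons d rest ih =>
    by_cases hd : PySem.Chars.isspace d = true
    · rw [List.dropWhile_cons_of_pos hd]
      rcases List.mem_cons.mp hc with h | h
      · subst h; simp [hs] at hd
      · exact ih h
    · rw [List.dropWhile_cons_of_neg hd]; exact hc

theorem strip_ne_nil (l : List Char) (hx : ∃ c ∈ l, PySem.Chars.isspace c = false) :
    PySem.Chars.strip l ≠ [] := by
  unfold PySem.Chars.strip PySem.Chars.rstrip PySem.Chars.lstrip
  rcases hx with ⟨c, hc, hs⟩
  have h1 : c ∈ (l.dropWhile PySem.Chars.isspace) := mem_dropWhile_of_not hc hs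
  have h2 : c ∈ (l.dropWhile PySem.Chars.isspace).reverse := by simpa using h1
  have h3 := mem_dropWhile_of_not h2 hs
  simp only [ne_eq, List.reverse_eq_nil_iff]
  intro h
  rw [h] at h3; simp at h3

theorem mem_intercalate_head {α : Type} (sep w : List α) (ws : List (List α)) {x : α}
    (hx : x ∈ w) : x ∈ sep.intercalate (w :: ws) := by
  cases ws with
  | nil => simpa [List.intercalate] using hx
  | cons v vs => rw [intercalate_cc]; simp [hx]

theorem preprocess_content_py_spec : Claim_equal_preprocess_content_py := by
  intro tc ml _
  unfold Spec_preprocess_content_py preprocess_content_py preprocess_content_py_alt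
  simp only []
  set ws := PySem.Chars.split₀ tc.toList with hws
  have htext : PySem.Str.join " " (PySem.Str.split₀ tc)
      = String.ofList (PySem.Chars.join [' '] ws) := by
    unfold PySem.Str.join PySem.Str.split₀
    congr 1
    rw [hws]
    have : ("\n" : String).toList = ['\n'] := by decide
    have h2 : (" " : String).toList = [' '] := by decide
    rw [h2]
    congr 1
    simp [Function.comp_def]
  set cs := PySem.Chars.join [' '] ws with hcs
  rw [htext]
  have htl : (String.ofList cs).toList = cs := by simp
  cases hwsc : ws with
  | nil =>
    have hcsnil : cs = [] := by simp [hcs, hwsc, PySem.Chars.join, List.intercalate]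
    rw [htl, hcsnil]
    have hsplit : PySem.Chars.splitOn ([] : List Char) "\n".toList = [[]] := by
      have : "\n".toList = ['\n'] := by decide
      rw [this]
      exact splitOn_no_sep '\n' [] (by simp)
    rw [hsplit]
    simp only [List.map_cons, List.map_nil, List.foldl_cons, List.foldl_nil]
    rw [if_neg (by decide)]
    rw [show PySem.Str.join "\n" ([] : List String) = String.ofList ([] : List Char) from by decide]
  | cons w rest =>
    have hwords := split0_words tc.toList
    rw [← hws] at hwords
    have hwmem : w ∈ ws := by rw [hwsc]; simp
    obtain ⟨hwne, hwns⟩ := hwords w hwmem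
    obtain ⟨a, as, rfl⟩ : ∃ a as, w = a :: as := by
      cases w with | nil => exact absurd rfl hwne | cons a as => exact ⟨a, as, rfl⟩
    have hamem : a ∈ cs := by
      rw [hcs, hwsc]
      exact mem_intercalate_head [' '] _ rest (by simp)
    have hnn : '\n' ∉ cs := by
      rw [hcs]; exact no_newline tc.toList hwords
    have hsplit : PySem.Chars.splitOn cs "\n".toList = [cs] := by
      have : "\n".toList = ['\n'] := by decide
      rw [this]
      exact splitOn_no_sep '\n' cs hnn
    rw [htl, hsplit]
    simp only [List.map_cons, List.map_nil, List.foldl_cons, List.foldl_nil]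
    rw [if_pos]
    · simp only
      have hj : PySem.Str.join "\n" ([] ++ [String.ofList cs]) = String.ofList cs := by
        unfold PySem.Str.join
        simp [PySem.Chars.join, List.intercalate]
      rw [hj]
    · constructor
      · unfold PySem.Str.strip
        intro h
        have h2 : PySem.Chars.strip (String.ofList cs).toList = [] := by
          have := congrArg String.toList h
          simpa using this
        rw [htl] at h2
        exact strip_ne_nil cs ⟨a, hamem, hwns a (by simp)⟩ h2
      · simp [PySem.Set.empty]
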